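-- pv_equiv track=rewrite | github.com/Raghvendra-26/AI-Shorts-Bot | src/pipeline.py | reuse_no_adjacent
-- ===== SOURCE A (Python) =====
-- def reuse_no_adjacent(clips: list[str], target: int) -> list[str]:
--     if not clips:
--         raise RuntimeError("No background clips available")
--
--     result = []
--     i = 0
--     while len(result) < target:
--         candidate = clips[i % len(clips)]
--         if not result or result[-1] != candidate:
--             result.append(candidate)
--         i += 1
--
--     return result
-- ===== SOURCE B (Python) =====
-- def reuse_no_adjacent(clips: list[str], target: int) -> list[str]:
--     if not clips:
--         raise RuntimeError("No background clips available")
--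
--     n = max(target, 0)
--     # one period of the adjacent-deduplicated cycle
--     base = [clips[0]]
--     for c in clips[1:]:
--         if c != base[-1]:
--             base.append(c)
--     # every later period: drop the leading element if it merges across the wrap
--     rep = base[1:] if base[-1] == base[0] else base
--     out = list(base)
--     while len(out) < n:
--         out += rep
--     return out[:n]
-- ===== Notes on version B (the rewrite author's own statement) =====
-- stated objective: alternative
-- what changed: B computes one adjacent-deduplicated period of the clip list, derives the repeated tail block (dropping the head when the run wraps), fills to the target length by whole-block appends and truncates, instead of A's per-element index-modulo-and-compare while loop.
import Mathlib
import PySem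

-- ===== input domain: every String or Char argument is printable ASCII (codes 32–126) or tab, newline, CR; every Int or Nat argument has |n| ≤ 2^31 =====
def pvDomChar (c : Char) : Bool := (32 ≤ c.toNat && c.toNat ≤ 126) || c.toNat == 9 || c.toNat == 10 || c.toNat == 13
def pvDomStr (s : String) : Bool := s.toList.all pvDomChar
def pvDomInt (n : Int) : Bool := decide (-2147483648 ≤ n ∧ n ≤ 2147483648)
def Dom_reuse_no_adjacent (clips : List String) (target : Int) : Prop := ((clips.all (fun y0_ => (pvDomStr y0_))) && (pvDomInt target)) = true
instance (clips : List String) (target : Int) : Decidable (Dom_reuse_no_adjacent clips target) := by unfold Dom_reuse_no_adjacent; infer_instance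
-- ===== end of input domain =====

-- B rebuilds the result from ONE adjacent-deduplicated period plus a repeated tail block,
-- instead of A's per-element index-modulo-and-compare loop (objective: alternative decomposition).

-- ===== PORT A =====
-- A's while loop; fuel makes it total: under Pre_ the loop performs at most
-- (target.toNat + 1) * clips.length iterations (proved below), so the fuel is never exhausted there.
def pvAloop (clips : List String) (target : Int) : Nat → List String → Nat → List String
  | 0, res, _ => res
  | f+1, res, i =>
    if (res.length : Int) < target then
      -- clips[i % len(clips)]: i ≥ 0 and clips ≠ [] here, so Nat `%` and getD are exact
      let candidate := clips.getD (i % clips.length) ""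
      let res' := if res.isEmpty ∨ res.getLast? ≠ some candidate then res ++ [candidate] else res
      pvAloop clips target f res' (i+1)
    else res

def reuse_no_adjacent (clips : List String) (target : Int) : List String :=
  match clips with
  | [] => []   -- Python: raise RuntimeError (excluded by Pre_)
  | _ :: _ => pvAloop clips target ((target.toNat + 1) * clips.length + 1) [] 0

-- ===== PORT B =====
-- Source B's `while len(out) < n: out += rep`; fuel n suffices: each pass appends rep, which is
-- nonempty under Pre_ (outside Pre_ the Python loop diverges).
def pvBfill (rep : List String) (n : Nat) : Nat → List String → List String
  | 0, out => out
  | f+1, out => if out.length < n then pvBfill rep n f (out ++ rep) else out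

def reuse_no_adjacent_alt (clips : List String) (target : Int) : List String :=
  match clips with
  | [] => []   -- Python: raise RuntimeError (excluded by Pre_)
  | x :: rest =>
    let n := (max target 0).toNat
    let base := rest.foldl (fun acc c => if acc.getLast? ≠ some c then acc ++ [c] else acc) [x]
    let rep := if base.getLast? = base.head? then base.drop 1 else base
    (pvBfill rep n n base).take n

-- ===== PRECONDITION & SPEC =====
-- Pre_ excludes only inputs on which A does not return: empty clips (A raises RuntimeError)
-- and all-equal clips with target ≥ 2 (A's while loop never reaches the target length and diverges).
def Pre_reuse_no_adjacent (clips : List String) (target : Int) : Prop :=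
  clips ≠ [] ∧ (target ≤ 1 ∨ ∃ y ∈ clips, clips.head? ≠ some y)
instance (clips : List String) (target : Int) : Decidable (Pre_reuse_no_adjacent clips target) := by
  unfold Pre_reuse_no_adjacent; infer_instance

def pvWitness_reuse_no_adjacent : List String × Int := (["a", "b"], 3)

def Spec_reuse_no_adjacent (clips : List String) (target : Int) (out : List String) : Prop := out = reuse_no_adjacent_alt clips target
instance (clips : List String) (target : Int) (out : List String) : Decidable (Spec_reuse_no_adjacent clips target out) := by unfold Spec_reuse_no_adjacent; infer_instance

-- ===== CLAIM (what is proved, stated in full; the proofs are below) =====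
def Claim_equal_reuse_no_adjacent : Prop := ∀ (clips : List String) (target : Int), Dom_reuse_no_adjacent clips target → Pre_reuse_no_adjacent clips target → Spec_reuse_no_adjacent clips target (reuse_no_adjacent clips target)

-- ===== LEMMAS AND PROOFS =====

-- Adjacent deduplication with a carried "last emitted" value.
def ded : Option String → List String → List String
  | _, [] => []
  | last, x :: xs => if last = some x then ded last xs else x :: ded (some x) xs

-- the cyclic stream and its prefixes
def cyc (clips : List String) (i : Nat) : String := clips.getD (i % clips.length) ""
def cycPre (clips : List String) (i : Nat) : List String := (List.range i).map (cyc clips)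
def dp (clips : List String) (i : Nat) : List String := ded none (cycPre clips i)

lemma getLast?_cons_or (x : String) (d : List String) (c : Option String) :
    (x :: d).getLast?.or c = d.getLast?.or (some x) := by
  cases d with
  | nil => simp
  | cons y t =>
    rw [List.getLast?_cons_cons]
    cases h : (y :: t).getLast? with
    | none => exact absurd h (by simp)
    | some z => simp [Option.or]


lemma ded_append (l1 l2 : List String) (c : Option String) :
    ded c (l1 ++ l2) = ded c l1 ++ ded ((ded c l1).getLast?.or c) l2 := by
  induction l1 generalizing c with
  | nil => simp [ded]
  | cons x xs ih =>
    by_cases h : c = some x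
    · simp [ded, h, ih]
    · simp only [List.cons_append, ded, if_neg h, ih (some x)]
      rw [getLast?_cons_or]


lemma ded_some (c x : String) (xs : List String) :
    ded (some c) (x :: xs) = if x = c then (ded none (x :: xs)).tail else ded none (x :: xs) := by
  by_cases h : x = c
  · subst h; simp [ded]
  · have h' : ¬ c = x := fun hc => h hc.symm
    simp [ded, h, h']


lemma ded_nil_allEq (c : String) (l : List String) (h : ded (some c) l = []) :
    ∀ y ∈ l, y = c := by
  induction l with
  | nil => simp
  | cons y ys ih =>
    by_cases hc : some c = some y
    · obtain rfl : c = y := Option.some.inj hc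
      rw [ded, if_pos rfl] at h
      intro z hz
      cases hz with
      | head => rfl
      | tail _ hz' => exact ih h z hz'
    · rw [ded, if_neg hc] at h
      exact absurd h (by simp)


lemma foldl_ded (l a : List String) (ha : a ≠ []) :
    l.foldl (fun acc c => if acc.getLast? ≠ some c then acc ++ [c] else acc) a
      = a ++ ded a.getLast? l := by
  induction l generalizing a with
  | nil => simp [ded]
  | cons c cs ih =>
    by_cases h : a.getLast? = some c
    · simp only [List.foldl_cons, if_neg (not_not_intro h), ded, ih a ha, if_pos h]
    · have hne : a ++ [c] ≠ [] := by simp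
      have hlast : (a ++ [c]).getLast? = some c := List.getLast?_concat
      simp only [List.foldl_cons, if_pos h, ded,
        if_neg (fun hh : a.getLast? = some c => h hh), ih (a ++ [c]) hne, hlast,
        List.append_assoc, List.cons_append, List.nil_append]


lemma cycPre_add (clips : List String) (i m : Nat) :
    cycPre clips (i + m) = cycPre clips i ++ (List.range m).map (fun k => cyc clips (i + k)) := by
  simp [cycPre, List.range_add, Function.comp]


lemma dp_prefix (clips : List String) (i j : Nat) (h : i ≤ j) : dp clips i <+: dp clips j := by
  obtain ⟨m, rfl⟩ := Nat.exists_eq_add_of_le h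
  rw [dp, dp, cycPre_add, ded_append]
  exact List.prefix_append _ _


lemma flatten_replicate_snoc (k : Nat) (C : List String) :
    (List.replicate k C).flatten ++ C = (List.replicate (k+1) C).flatten := by
  induction k with
  | zero => simp
  | succ k ih => simp only [List.replicate_succ, List.flatten_cons, List.append_assoc, ih]


lemma map_getD_range (l : List String) :
    (List.range l.length).map (fun j => l.getD j "") = l := by
  apply List.ext_getElem
  · simp
  · intro i h1 h2
    simp only [List.getElem_map, List.getElem_range]
    exact List.getD_eq_getElem l "" (by simpa using h1)


lemma cycPre_period (clips : List String) (k : Nat) :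
    cycPre clips (k * clips.length) = (List.replicate k clips).flatten := by
  induction k with
  | zero => simp [cycPre]
  | succ k ih =>
    rw [Nat.succ_mul, cycPre_add, ih, ← flatten_replicate_snoc]
    congr 1
    have : ∀ j ∈ List.range clips.length, cyc clips (k * clips.length + j) = clips.getD j "" := by
      intro j hj
      rw [List.mem_range] at hj
      have : (k * clips.length + j) % clips.length = j := by
        rw [Nat.add_comm, Nat.add_mul_mod_self_right, Nat.mod_eq_of_lt hj]
      simp [cyc, this]
    rw [List.map_congr_left this, map_getD_range]


lemma flatten_replicate_nil (k : Nat) :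
    (List.replicate k ([] : List String)).flatten = [] := by
  induction k with
  | zero => rfl
  | succ k ih => simp [List.replicate_succ, ih]

lemma len_flatten_replicate (k : Nat) (l : List String) :
    ((List.replicate k l).flatten).length = k * l.length := by
  induction k with
  | zero => simp
  | succ k ih => simp [List.replicate_succ, ih, Nat.succ_mul]; omega

lemma rep_getLast (x b : String) (rest : List String)
    (hb : (ded none (x :: rest)).getLast? = some b)
    (hne : ded (some b) (x :: rest) ≠ []) :
    (ded (some b) (x :: rest)).getLast? = some b := by
  have hbase : ded none (x :: rest) = x :: ded (some x) rest := by simp [ded]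
  rw [ded_some] at hne ⊢
  by_cases hxb : x = b
  · rw [if_pos hxb] at hne ⊢
    rw [hbase] at hb hne ⊢
    simp only [List.tail_cons] at hne ⊢
    cases h : ded (some x) rest with
    | nil => exact absurd h hne
    | cons z t =>
      rw [h, List.getLast?_cons_cons] at hb
      exact hb
  · rw [if_neg hxb] at hne ⊢
    exact hb


lemma main_period (x b : String) (rest : List String)
    (hb : (ded none (x :: rest)).getLast? = some b) (k : Nat) :
    ded none ((List.replicate (k+1) (x :: rest)).flatten)
        = ded none (x :: rest) ++ (List.replicate k (ded (some b) (x :: rest))).flatten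
      ∧ (ded none (x :: rest) ++ (List.replicate k (ded (some b) (x :: rest))).flatten).getLast? = some b := by
  induction k with
  | zero => constructor <;> simp [hb]
  | succ k ih =>
    obtain ⟨ih1, ih2⟩ := ih
    have hcar : (ded none ((List.replicate (k+1) (x :: rest)).flatten)).getLast?.or none = some b := by
      rw [ih1, Option.or_none, ih2]
    have h1 : ded none ((List.replicate (k+1+1) (x :: rest)).flatten)
        = ded none (x :: rest) ++ (List.replicate (k+1) (ded (some b) (x :: rest))).flatten := by
      rw [← flatten_replicate_snoc, ded_append, hcar, ih1, ← flatten_replicate_snoc,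
        List.append_assoc]
    refine ⟨h1, ?_⟩
    by_cases hrep : ded (some b) (x :: rest) = []
    · rw [hrep, flatten_replicate_nil, List.append_nil, hb]
    · rw [← flatten_replicate_snoc, ← List.append_assoc, List.getLast?_append,
        rep_getLast x b rest hb hrep, Option.some_or]


lemma dp_succ (clips : List String) (i : Nat) :
    dp clips (i+1) = if (dp clips i).getLast? = some (cyc clips i)
      then dp clips i else dp clips i ++ [cyc clips i] := by
  have hc : cycPre clips (i+1) = cycPre clips i ++ [cyc clips i] := by
    rw [cycPre_add clips i 1]; simp
  simp only [dp]
  rw [hc, ded_append, Option.or_none]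
  by_cases h : (ded none (cycPre clips i)).getLast? = some (cyc clips i)
  · rw [if_pos h, h]
    simp [ded]
  · rw [if_neg h, ded, if_neg h]
    simp [ded]


lemma aloop_spec (clips : List String) (target : Int) :
    ∀ (f i : Nat), (dp clips i).length ≤ target.toNat → target.toNat ≤ (dp clips (i + f)).length →
    ∃ j, pvAloop clips target f (dp clips i) i = dp clips j ∧ (dp clips j).length = target.toNat := by
  intro f
  induction f with
  | zero =>
    intro i h1 h2
    rw [Nat.add_zero] at h2
    exact ⟨i, rfl, le_antisymm h1 h2⟩
  | succ f ih =>
    intro i h1 h2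
    have hlen1 : (dp clips (i+1)).length ≤ (dp clips i).length + 1 := by
      rw [dp_succ]; split <;> simp
    by_cases hc : ((dp clips i).length : Int) < target
    · have hlt : (dp clips i).length < target.toNat := by omega
      have hstep : (if (dp clips i).isEmpty ∨ (dp clips i).getLast? ≠ some (clips.getD (i % clips.length) "")
          then dp clips i ++ [clips.getD (i % clips.length) ""] else dp clips i) = dp clips (i+1) := by
        rw [dp_succ]
        by_cases h : (dp clips i).getLast? = some (cyc clips i)
        · have hemp : ¬ (dp clips i).isEmpty := by
            cases hd : dp clips i with
            | nil => rw [hd] at h; simp at h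
            | cons a t => simp
          rw [if_pos h, if_neg (by simp [cyc] at h; simp [hemp, h])]
        · rw [if_neg h, if_pos (Or.inr (by simpa [cyc] using h))]; rfl
      simp only [pvAloop, if_pos hc, hstep]
      have h2' : target.toNat ≤ (dp clips (i + 1 + f)).length := by
        have : i + 1 + f = i + (f + 1) := by omega
        rw [this]; exact h2
      exact ih (i+1) (by omega) h2'
    · have heq : (dp clips i).length = target.toNat := by omega
      simp only [pvAloop, if_neg hc]
      exact ⟨i, rfl, heq⟩


lemma bfill_take (rep : List String) (n : Nat) :
    ∀ (f : Nat) (out : List String), n ≤ out.length + f * rep.length →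
    (pvBfill rep n f out).take n = (out ++ (List.replicate f rep).flatten).take n := by
  intro f
  induction f with
  | zero => intro out h; simp [pvBfill]
  | succ f ih =>
    intro out h
    simp only [pvBfill]
    rw [Nat.succ_mul] at h
    by_cases hlt : out.length < n
    · rw [if_pos hlt, ih (out ++ rep) (by simp only [List.length_append]; omega),
        List.append_assoc, List.replicate_succ, List.flatten_cons]
    · rw [if_neg hlt, List.take_append_of_le_length (by omega)]


-- ===== VERDICT (by name: the statement is the Claim_ definition above) =====
theorem reuse_no_adjacent_spec : Claim_equal_reuse_no_adjacent := by
  intro clips target _ hpre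
  obtain ⟨hne, hdisj⟩ := hpre
  unfold Spec_reuse_no_adjacent
  cases clips with
  | nil => exact absurd rfl hne
  | cons x rest =>
    have hbase0 : ded none (x :: rest) = x :: ded (some x) rest := by simp [ded]
    obtain ⟨b, hb⟩ : ∃ b, (ded none (x :: rest)).getLast? = some b := by
      rw [hbase0]
      cases h : (x :: ded (some x) rest).getLast? with
      | none => exact absurd h (by simp)
      | some b => exact ⟨b, rfl⟩
    have hnmax : (max target 0).toNat = target.toNat := by
      rcases le_total target 0 with h | h
      · rw [max_eq_right h]; omega
      · rw [max_eq_left h]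
    have hlenb : 1 ≤ (ded none (x :: rest)).length := by rw [hbase0]; simp
    -- growth bound: target.toNat elements fit in base ++ rep^(target.toNat)
    have gb : target.toNat ≤ (ded none (x :: rest)).length
        + target.toNat * (ded (some b) (x :: rest)).length := by
      by_cases hrep : ded (some b) (x :: rest) = []
      · have hall := ded_nil_allEq b _ hrep
        have ht1 : target ≤ 1 := by
          rcases hdisj with h | ⟨y, hy, hyne⟩
          · exact h
          · have hyb : y = b := hall y hy
            have hxb : x = b := hall x (by simp)
            exact absurd (by rw [List.head?_cons, hxb, hyb]) hyne
        omega
      · have h1 : 1 ≤ (ded (some b) (x :: rest)).length := by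
          cases hd : ded (some b) (x :: rest) with
          | nil => exact absurd hd hrep
          | cons z t => simp
        have := Nat.mul_le_mul_left target.toNat h1
        omega
    obtain ⟨hM1, hM2⟩ := main_period x b rest hb target.toNat
    have hMdp : dp (x :: rest) ((target.toNat + 1) * (x :: rest).length)
        = ded none (x :: rest)
          ++ (List.replicate target.toNat (ded (some b) (x :: rest))).flatten := by
      rw [dp, cycPre_period, hM1]
    have hMlen : (dp (x :: rest) ((target.toNat + 1) * (x :: rest).length)).length
        = (ded none (x :: rest)).length
          + target.toNat * (ded (some b) (x :: rest)).length := by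
      rw [hMdp, List.length_append, len_flatten_replicate]
    have hdp0 : dp (x :: rest) 0 = [] := by simp [dp, cycPre, ded]
    have hgrow : target.toNat
        ≤ (dp (x :: rest) (0 + ((target.toNat + 1) * (x :: rest).length + 1))).length := by
      have hpre : dp (x :: rest) ((target.toNat + 1) * (x :: rest).length)
          <+: dp (x :: rest) (0 + ((target.toNat + 1) * (x :: rest).length + 1)) :=
        dp_prefix _ _ _ (by omega)
      calc target.toNat ≤ (dp (x :: rest) ((target.toNat + 1) * (x :: rest).length)).length := by
            rw [hMlen]; exact gb
        _ ≤ _ := hpre.length_le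
    obtain ⟨j, hj, hjlen⟩ := aloop_spec (x :: rest) target
      ((target.toNat + 1) * (x :: rest).length + 1) 0 (by rw [hdp0]; simp) hgrow
    rw [hdp0] at hj
    have hA : reuse_no_adjacent (x :: rest) target = dp (x :: rest) j := hj
    -- B side
    have hfold : rest.foldl (fun acc c => if acc.getLast? ≠ some c then acc ++ [c] else acc) [x]
        = ded none (x :: rest) := by
      rw [foldl_ded rest [x] (by simp), hbase0]
      simp
    have hrepB : (if (ded none (x :: rest)).getLast? = (ded none (x :: rest)).head?
          then (ded none (x :: rest)).drop 1 else ded none (x :: rest))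
        = ded (some b) (x :: rest) := by
      rw [ded_some, hb, hbase0]
      simp only [List.head?_cons, List.drop_one, List.tail_cons]
      by_cases hxb : x = b
      · rw [if_pos (by rw [hxb]), if_pos hxb]
      · rw [if_neg (fun h => hxb (Option.some.inj h).symm), if_neg hxb]
    have hB : reuse_no_adjacent_alt (x :: rest) target
        = (dp (x :: rest) ((target.toNat + 1) * (x :: rest).length)).take target.toNat := by
      simp only [reuse_no_adjacent_alt, hnmax, hfold, hrepB]
      rw [bfill_take _ _ _ _ gb, hMdp]
    rw [hA, hB]
    have hMn : target.toNat
        ≤ (dp (x :: rest) ((target.toNat + 1) * (x :: rest).length)).length := by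
      rw [hMlen]; exact gb
    rcases le_total j ((target.toNat + 1) * (x :: rest).length) with hle | hle
    · obtain ⟨t, ht⟩ := dp_prefix (x :: rest) j _ hle
      rw [← ht, List.take_append_of_le_length (le_of_eq hjlen.symm),
        List.take_of_length_le (le_of_eq hjlen)]
    · obtain ⟨t, ht⟩ := dp_prefix (x :: rest) _ j hle
      conv_lhs => rw [← List.take_of_length_le (le_of_eq hjlen), ← ht]
      rw [List.take_append_of_le_length hMn]
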